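-- pv_equiv track=rewrite | github.com/kmcos/kmcos | kmcos/interactions/configurationsAndInteractions.py | getCombinedSiteOccupationPossibilities
-- ===== SOURCE A (Python) =====
-- import itertools
--
-- def getCombinedSiteOccupationPossibilities(siteOccupationPossibilitiesLists):
--     #First create the possibilities using an iter product.
--     CombinedSiteOccupationPossibilitiesIter = itertools.product(*siteOccupationPossibilitiesLists)
--     #Then initialize list that will be populated and then returned
--     CombinedSiteOccupationPossibilitiesList = []
--     #get the data structure we need out of the iter product.
--     for possibility in CombinedSiteOccupationPossibilitiesIter:
--         #Because these are nested structures, the iter product is a bunch of lists, and we need a single list. So we chain them.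
--         chainedPossibility = list(itertools.chain.from_iterable(possibility))
--         #We are going to sort the possibility also, so that when we want to exclude common possibilities later we can detect them easily.
--         sortedChainedPossibility = sorted(chainedPossibility)
--         CombinedSiteOccupationPossibilitiesList.append(sortedChainedPossibility)
--     return CombinedSiteOccupationPossibilitiesList
-- ===== SOURCE B (Python) =====
-- def getCombinedSiteOccupationPossibilities(siteOccupationPossibilitiesLists):
--     # Mixed-radix index decoding: the k-th combination is computed directly from its
--     # index k, instead of materializing the cartesian product with itertools.
--     total = 1
--     for options in siteOccupationPossibilitiesLists:
--         total *= len(options)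
--     combined = []
--     for index in range(total):
--         combo = []
--         rem = index
--         block = total
--         for options in siteOccupationPossibilitiesLists:
--             block //= len(options)
--             digit, rem = divmod(rem, block)
--             combo.extend(options[digit])
--         combined.append(sorted(combo))
--     return combined
-- ===== Notes on version B (the rewrite author's own statement) =====
-- stated objective: alternative
-- what changed: Replaces itertools.product (which materializes each tuple, to be chained and sorted) with mixed-radix index decoding: the total count is computed first and the k-th combination is reconstructed directly from the digits of k via repeated divmod, never building the product tuples.
import Mathlib
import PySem

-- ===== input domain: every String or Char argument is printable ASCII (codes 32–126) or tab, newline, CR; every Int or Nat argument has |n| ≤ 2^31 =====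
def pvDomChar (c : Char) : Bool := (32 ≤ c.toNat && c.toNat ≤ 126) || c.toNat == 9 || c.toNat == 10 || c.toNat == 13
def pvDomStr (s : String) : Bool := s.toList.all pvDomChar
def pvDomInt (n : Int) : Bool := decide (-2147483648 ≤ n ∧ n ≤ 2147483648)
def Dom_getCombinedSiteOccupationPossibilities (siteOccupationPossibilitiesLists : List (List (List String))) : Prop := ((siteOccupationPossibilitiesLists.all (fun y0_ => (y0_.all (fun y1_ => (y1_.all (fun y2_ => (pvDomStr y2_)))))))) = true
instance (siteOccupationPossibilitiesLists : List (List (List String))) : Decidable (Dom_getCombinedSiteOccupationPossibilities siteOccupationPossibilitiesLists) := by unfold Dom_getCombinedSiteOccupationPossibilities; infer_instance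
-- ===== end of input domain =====

-- B replaces itertools.product with mixed-radix index decoding: each combination is
-- computed directly from its index (objective: alternative algorithm, same cost).

-- ===== PORT A =====
-- itertools.product(*lists): tuples ported as lists, last factor varies fastest
def pvProductA (ls : List (List (List String))) : List (List (List String)) :=
  match ls with
  | [] => [[]]
  | l :: rest => l.flatMap (fun x => (pvProductA rest).map (fun p => x :: p))

def getCombinedSiteOccupationPossibilities (siteOccupationPossibilitiesLists : List (List (List String))) : List (List String) :=
  -- for possibility in product: append sorted(list(chain.from_iterable(possibility)))
  (pvProductA siteOccupationPossibilitiesLists).foldl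
    (fun acc possibility => acc ++ [PySem.List.sorted possibility.flatten (fun x => x)]) []

-- ===== PORT B =====
-- inner-loop body: block //= len(options); digit, rem = divmod(rem, block); combo.extend(options[digit])
-- (divmod / options[digit] ported total — floordiv/mod and pyGet?.getD []; the zero-divisor /
-- out-of-range cases are unreachable since the outer loop runs only when total > 0)
def pvStepB (st : List String × Int × Int) (options : List (List String)) : List String × Int × Int :=
  let block := PySem.Int.floordiv st.2.2 (options.length : Int)
  let digit := PySem.Int.floordiv st.2.1 block
  let rem := PySem.Int.mod st.2.1 block
  (st.1 ++ (PySem.List.pyGet? options digit).getD [], rem, block)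

def getCombinedSiteOccupationPossibilities_alt (siteOccupationPossibilitiesLists : List (List (List String))) : List (List String) :=
  let total := siteOccupationPossibilitiesLists.foldl (fun t options => t * (options.length : Int)) 1
  (PySem.List.pyRange 0 total 1).foldl
    (fun combined index =>
      combined ++ [PySem.List.sorted (siteOccupationPossibilitiesLists.foldl pvStepB ([], index, total)).1 (fun x => x)])
    []

-- ===== PRECONDITION & SPEC =====
def Spec_getCombinedSiteOccupationPossibilities (siteOccupationPossibilitiesLists : List (List (List String))) (out : List (List String)) : Prop := out = getCombinedSiteOccupationPossibilities_alt siteOccupationPossibilitiesLists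
instance (siteOccupationPossibilitiesLists : List (List (List String))) (out : List (List String)) : Decidable (Spec_getCombinedSiteOccupationPossibilities siteOccupationPossibilitiesLists out) := by unfold Spec_getCombinedSiteOccupationPossibilities; infer_instance

-- ===== CLAIM (what is proved, stated in full; the proofs are below) =====
def Claim_equal_getCombinedSiteOccupationPossibilities : Prop := ∀ (siteOccupationPossibilitiesLists : List (List (List String))), Dom_getCombinedSiteOccupationPossibilities siteOccupationPossibilitiesLists → Spec_getCombinedSiteOccupationPossibilities siteOccupationPossibilitiesLists (getCombinedSiteOccupationPossibilities siteOccupationPossibilitiesLists)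

-- ===== LEMMAS AND PROOFS =====

-- number of combinations
def pvProdN (ls : List (List (List String))) : Nat := (ls.map List.length).prod

lemma pvTotal_eq (ls : List (List (List String))) (t : Int) :
    ls.foldl (fun t options => t * (options.length : Int)) t = t * (pvProdN ls : Int) := by
  induction ls generalizing t with
  | nil => simp [pvProdN]
  | cons l rest ih =>
    simp only [List.foldl_cons, ih, pvProdN, List.map_cons, List.prod_cons]
    push_cast; ring

lemma pvLen_productA (ls : List (List (List String))) :
    (pvProductA ls).length = pvProdN ls := by
  induction ls with
  | nil => simp [pvProductA, pvProdN]
  | cons l rest ih =>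
    simp only [pvProductA, pvProdN, List.length_flatMap, List.map_cons, List.prod_cons,
      List.length_map, ih]
    rw [List.map_const', List.sum_replicate, smul_eq_mul]

lemma pvRange_mul (n m : Nat) :
    List.range (n * m) = (List.range n).flatMap (fun a => (List.range m).map (fun b => a * m + b)) := by
  induction n with
  | zero => simp
  | succ n ih =>
    rw [Nat.succ_mul, List.range_add, ih, List.range_succ, List.flatMap_append]
    simp

lemma pvFlatMap_range_getD {α β : Type} (l : List α) (d : α) (g : α → List β) :
    (List.range l.length).flatMap (fun a => g (l.getD a d)) = l.flatMap g := by
  induction l with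
  | nil => simp
  | cons x l ih =>
    rw [List.length_cons, List.range_succ_eq_map, List.flatMap_cons, List.flatMap_map]
    simp only [List.getD_cons_zero, List.getD_cons_succ]
    simp only [List.getD_eq_getElem?_getD] at ih
    simp [ih]

-- one pass of the inner loop on index a*P+b with invariant block = m*P
lemma pvStepB_compute (l : List (List String)) (acc : List String) (a b P : Nat)
    (hm : 0 < l.length) (hb : b < P) :
    pvStepB (acc, ((a * P + b : Nat) : Int), ((l.length * P : Nat) : Int)) l
      = (acc ++ l.getD a [], ((b : Nat) : Int), ((P : Nat) : Int)) := by
  have hP : 0 < P := Nat.pos_of_ne_zero (by omega)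
  simp only [pvStepB, PySem.Int.floordiv_natCast, PySem.Int.mod_natCast,
    Nat.mul_div_cancel_left _ hm]
  have hdiv : (a * P + b) / P = a := by
    rw [Nat.add_comm, Nat.add_mul_div_right _ _ hP, Nat.div_eq_of_lt hb]
    omega
  have hmod : (a * P + b) % P = b := by
    rw [Nat.add_comm, Nat.add_mul_mod_self_right, Nat.mod_eq_of_lt hb]
  rw [hdiv, hmod]
  simp [PySem.List.pyGet?_natCast, List.getD]

-- the decoded combinations, in index order, are exactly the flattened product combinations
lemma pvDecode_eq (ls : List (List (List String))) (acc : List String) :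
    (List.range (pvProdN ls)).map
        (fun (i : Nat) => (ls.foldl pvStepB (acc, ((i : Nat) : Int), ((pvProdN ls : Nat) : Int))).1)
      = (pvProductA ls).map (fun p => acc ++ p.flatten) := by
  induction ls generalizing acc with
  | nil => simp [pvProdN, pvProductA]
  | cons l rest ih =>
    by_cases hz : pvProdN (l :: rest) = 0
    · have h1 : (List.range (pvProdN (l :: rest))).length = 0 := by simp [hz]
      have h2 : (pvProductA (l :: rest)).length = 0 := by rw [pvLen_productA, hz]
      rw [List.eq_nil_of_length_eq_zero h1, List.eq_nil_of_length_eq_zero h2]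
      simp
    · have hprod : pvProdN (l :: rest) = l.length * pvProdN rest := by
        simp [pvProdN]
      have hm : 0 < l.length := by
        rw [hprod] at hz
        exact Nat.pos_of_ne_zero (fun h => hz (by simp [h]))
      have hP : 0 < pvProdN rest := by
        rw [hprod] at hz
        exact Nat.pos_of_ne_zero (fun h => hz (by simp [h]))
      rw [hprod, pvRange_mul, List.map_flatMap]
      rw [pvProductA, List.map_flatMap]
      rw [← pvFlatMap_range_getD l []
        (fun x => ((pvProductA rest).map (fun p => x :: p)).map (fun p => acc ++ p.flatten))]
      refine List.flatMap_congr (fun a ha => ?_)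
      rw [List.map_map]
      have hb' : ∀ b ∈ List.range (pvProdN rest),
          ((fun (i : Nat) => ((l :: rest).foldl pvStepB (acc, ((i : Nat) : Int), ((l.length * pvProdN rest : Nat) : Int))).1) ∘ (fun b => a * pvProdN rest + b)) b
            = (fun (b : Nat) => (rest.foldl pvStepB (acc ++ l.getD a [], ((b : Nat) : Int), ((pvProdN rest : Nat) : Int))).1) b := by
        intro b hb
        simp only [Function.comp, List.foldl_cons]
        rw [pvStepB_compute l acc a b (pvProdN rest) hm (List.mem_range.mp hb)]
      rw [List.map_congr_left hb', ih]
      simp [List.map_map, Function.comp, List.append_assoc]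

-- ===== VERDICT (by name: the statement is the Claim_ definition above) =====
theorem getCombinedSiteOccupationPossibilities_spec : Claim_equal_getCombinedSiteOccupationPossibilities := by
  intro ls _
  show _ = _
  unfold getCombinedSiteOccupationPossibilities getCombinedSiteOccupationPossibilities_alt
  simp only [PySem.List.foldl_append_singleton_eq_map, List.nil_append]
  rw [pvTotal_eq, one_mul, PySem.List.pyRange_zero_nat, List.map_map]
  rw [show ((fun index => PySem.List.sorted (ls.foldl pvStepB ([], index, ((pvProdN ls : Nat) : Int))).1 (fun x => x)) ∘ (fun (k : Nat) => (k : Int)))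
      = ((fun c => PySem.List.sorted c (fun x => x)) ∘ (fun (i : Nat) => (ls.foldl pvStepB ([], ((i : Nat) : Int), ((pvProdN ls : Nat) : Int))).1)) from rfl]
  rw [← List.map_map, pvDecode_eq ls []]
  simp [List.map_map, Function.comp]
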